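-- pv_equiv track=rewrite | github.com/JoeOvenden/ProjectEuler | Completed/problems40-49/problem47/distinct-prime-factors.py | check_distinct
-- ===== SOURCE A (Python) =====
-- def check_distinct(factors_list):
--     # factors_list is a list containing the 4 dictionaries of prime factors
--     # the dictionaires should all be checked to be of length 4 already
--     # goes through factors and if finds a duplicate distinct is set to False
--     distinct_factors = []
--     distinct = True
--     for i in range(4):
--         for factor in factors_list[i]:
--             factor_pair = [factor, factors_list[i][factor]]
--             if factor_pair in distinct_factors:
--                 distinct = False
--                 break
--             else:
--                 distinct_factors.append(factor_pair)
--     return distinct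
-- ===== SOURCE B (Python) =====
-- def check_distinct(factors_list):
--     pairs = [(factor, factors_list[i][factor]) for i in range(4) for factor in factors_list[i]]
--     return len(pairs) == len(set(pairs))
-- ===== Notes on version B (the rewrite author's own statement) =====
-- stated objective: simpler
-- what changed: Replace the incremental seen-list membership scan with inner break by collecting all (factor, count) pairs of the first four dicts and comparing the list's length with its set's cardinality.
import Mathlib
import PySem

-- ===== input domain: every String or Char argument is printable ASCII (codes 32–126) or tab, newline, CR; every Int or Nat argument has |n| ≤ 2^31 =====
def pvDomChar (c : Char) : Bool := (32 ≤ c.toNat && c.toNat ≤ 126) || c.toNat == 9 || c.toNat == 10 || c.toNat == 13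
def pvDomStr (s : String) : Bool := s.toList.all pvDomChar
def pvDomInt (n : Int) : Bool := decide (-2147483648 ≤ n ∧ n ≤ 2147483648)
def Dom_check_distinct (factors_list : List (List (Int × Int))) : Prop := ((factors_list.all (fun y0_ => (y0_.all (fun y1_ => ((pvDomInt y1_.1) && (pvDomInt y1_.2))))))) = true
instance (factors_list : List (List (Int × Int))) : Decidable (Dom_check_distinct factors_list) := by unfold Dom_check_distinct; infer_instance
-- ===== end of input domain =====

-- B replaces A's incremental seen-list scan (with inner break) by collecting all pairs of the
-- first four dicts and comparing the list length with its set cardinality (simpler decomposition).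

-- ===== PORT A =====
-- the dict factors_list[i], from its association-list representation
def pvDictAt (factors_list : List (List (Int × Int))) (i : Int) : PySem.Dict Int Int :=
  PySem.Dict.ofList ((PySem.List.pyGet? factors_list i).getD [])

-- inner loop 'for factor in factors_list[i]: …' with its break, state = (distinct_factors, distinct)
def checkInner (d : PySem.Dict Int Int) :
    List Int → List (Int × Int) × Bool → List (Int × Int) × Bool
  | [], st => st
  | k :: ks, (df, distinct) =>
      let factor_pair : Int × Int := (k, d.getD k 0)
      if factor_pair ∈ df then (df, false)
      else checkInner d ks (df ++ [factor_pair], distinct)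

def check_distinct (factors_list : List (List (Int × Int))) : Bool :=
  ((PySem.List.pyRange 0 4 1).foldl
    (fun (st : List (Int × Int) × Bool) i =>
      let d := pvDictAt factors_list i
      checkInner d d.keys st)
    ([], true)).2

-- ===== PORT B =====
def check_distinct_alt (factors_list : List (List (Int × Int))) : Bool :=
  let pairs := (PySem.List.pyRange 0 4 1).flatMap (fun i =>
    let d := pvDictAt factors_list i
    d.keys.map (fun k => (k, d.getD k 0)))
  decide (pairs.length = (PySem.Set.ofList pairs).length)

-- ===== PRECONDITION & SPEC =====
-- Pre_ excludes lists with fewer than 4 dicts, on which both A and B raise IndexError at factors_list[i].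
def Pre_check_distinct (factors_list : List (List (Int × Int))) : Prop :=
  4 ≤ factors_list.length
instance (factors_list : List (List (Int × Int))) : Decidable (Pre_check_distinct factors_list) := by
  unfold Pre_check_distinct; infer_instance

def pvWitness_check_distinct : (List (List (Int × Int))) := [[(2, 1)], [(3, 1)], [(2, 2)], [(5, 1)]]

def Spec_check_distinct (factors_list : List (List (Int × Int))) (out : Bool) : Prop := out = check_distinct_alt factors_list
instance (factors_list : List (List (Int × Int))) (out : Bool) : Decidable (Spec_check_distinct factors_list out) := by unfold Spec_check_distinct; infer_instance

-- ===== CLAIM (what is proved, stated in full; the proofs are below) =====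
def Claim_equal_check_distinct : Prop := ∀ (factors_list : List (List (Int × Int))), Dom_check_distinct factors_list → Pre_check_distinct factors_list → Spec_check_distinct factors_list (check_distinct factors_list)

-- ===== LEMMAS AND PROOFS =====

-- the pairs contributed by one dict
def pvPairs (d : PySem.Dict Int Int) (ks : List Int) : List (Int × Int) :=
  ks.map (fun k => (k, d.getD k 0))

-- loop invariant relating A's state to the list L of all pairs seen so far
def pvInv (L : List (Int × Int)) (st : List (Int × Int) × Bool) : Prop :=
  st.1.Nodup ∧ (st.2 = true → st.1 = L ∧ L.Nodup) ∧ (st.2 = false → ¬ L.Nodup)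

theorem checkInner_of_nodup (d : PySem.Dict Int Int) (ks : List Int) (df : List (Int × Int))
    (b : Bool) (h : (df ++ pvPairs d ks).Nodup) :
    checkInner d ks (df, b) = (df ++ pvPairs d ks, b) := by
  induction ks generalizing df with
  | nil => simp [checkInner, pvPairs]
  | cons k ks ih =>
      have hpair : (k, d.getD k 0) ∉ df := by
        have := h.disjoint
        intro hm
        exact this hm (by simp [pvPairs])
      have h' : ((df ++ [(k, d.getD k 0)]) ++ pvPairs d ks).Nodup := by
        simpa [pvPairs, List.append_assoc] using h
      simp only [checkInner, if_neg hpair]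
      rw [ih _ h']
      simp [pvPairs, List.append_assoc]

theorem checkInner_inv (d : PySem.Dict Int Int) (ks : List Int) (df : List (Int × Int))
    (b : Bool) (hdf : df.Nodup) :
    (checkInner d ks (df, b)).1.Nodup ∧
    (b = false → (checkInner d ks (df, b)).2 = false) ∧
    (¬ (df ++ pvPairs d ks).Nodup → (checkInner d ks (df, b)).2 = false) := by
  induction ks generalizing df b with
  | nil =>
      refine ⟨hdf, fun hb => hb, fun hnd => ?_⟩
      exact absurd (by simpa [pvPairs] using hdf) (by simpa [pvPairs] using hnd)
  | cons k ks ih =>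
      by_cases hpair : (k, d.getD k 0) ∈ df
      · refine ⟨by simpa [checkInner, hpair] using hdf, ?_, ?_⟩ <;>
          intro _ <;> simp [checkInner, hpair]
      · have hdf' : (df ++ [(k, d.getD k 0)]).Nodup := by
          simp only [List.nodup_append, List.nodup_singleton, true_and]
          refine ⟨hdf, ?_⟩
          intro a ha b hb
          simp only [List.mem_singleton] at hb
          subst hb
          exact fun hc => hpair (hc ▸ ha)
        have := ih (df ++ [(k, d.getD k 0)]) b hdf'
        refine ⟨by simpa [checkInner, hpair] using this.1,
                fun hb => by simpa [checkInner, hpair] using this.2.1 hb,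
                fun hnd => ?_⟩
        have hnd' : ¬ ((df ++ [(k, d.getD k 0)]) ++ pvPairs d ks).Nodup := by
          intro hc; exact hnd (by simpa [pvPairs, List.append_assoc] using hc)
        simpa [checkInner, hpair] using this.2.2 hnd'

theorem checkInner_step (d : PySem.Dict Int Int) (L : List (Int × Int))
    (st : List (Int × Int) × Bool) (hInv : pvInv L st) :
    pvInv (L ++ pvPairs d d.keys) (checkInner d d.keys st) := by
  obtain ⟨df, b⟩ := st
  obtain ⟨hdf, htrue, hfalse⟩ := hInv
  cases b with
  | false =>
      have h := checkInner_inv d d.keys df false hdf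
      refine ⟨h.1, fun hb => absurd hb (by simp [h.2.1 rfl]), fun _ => ?_⟩
      intro hc
      exact hfalse rfl (hc.sublist (List.sublist_append_left _ _))
  | true =>
      obtain ⟨hdfL, hLnd⟩ := htrue rfl
      subst hdfL
      by_cases hnd : (df ++ pvPairs d d.keys).Nodup
      · rw [checkInner_of_nodup d d.keys df true hnd]
        exact ⟨hnd, fun _ => ⟨rfl, hnd⟩, fun hb => by simp at hb⟩
      · have h := checkInner_inv d d.keys df true hdf
        have hsnd := h.2.2 hnd
        exact ⟨h.1, fun hb => absurd hb (by simp [hsnd]), fun _ => hnd⟩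

theorem checkChain (factors_list : List (List (Int × Int))) (is : List Int)
    (L : List (Int × Int)) (st : List (Int × Int) × Bool) (hInv : pvInv L st) :
    pvInv (L ++ is.flatMap (fun i =>
        (pvDictAt factors_list i).keys.map (fun k => (k, (pvDictAt factors_list i).getD k 0))))
      (is.foldl (fun st i => checkInner (pvDictAt factors_list i) (pvDictAt factors_list i).keys st) st) := by
  induction is generalizing L st with
  | nil => simpa using hInv
  | cons i is ih =>
      have h1 := checkInner_step (pvDictAt factors_list i) L st hInv
      have h2 := ih (L ++ pvPairs (pvDictAt factors_list i) (pvDictAt factors_list i).keys)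
        (checkInner (pvDictAt factors_list i) (pvDictAt factors_list i).keys st) h1
      simpa [pvPairs, List.append_assoc] using h2

-- set(xs) is a sublist of xs
theorem foldl_add_sublist {α : Type} [BEq α] (xs s : List α) :
    ∃ t, xs.foldl PySem.Set.add s = s ++ t ∧ t.Sublist xs := by
  induction xs generalizing s with
  | nil => exact ⟨[], by simp⟩
  | cons x xs ih =>
      simp only [List.foldl_cons]
      by_cases hc : PySem.Set.contains s x = true
      · simp only [PySem.Set.add, if_pos hc]
        obtain ⟨t, ht, hs⟩ := ih s
        exact ⟨t, ht, hs.cons x⟩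
      · simp only [PySem.Set.add, if_neg hc]
        obtain ⟨t, ht, hs⟩ := ih (s ++ [x])
        refine ⟨x :: t, ?_, hs.cons₂ x⟩
        simpa [List.append_assoc] using ht

theorem nodup_iff_len_set {α : Type} [BEq α] [LawfulBEq α] (xs : List α) :
    xs.Nodup ↔ xs.length = (PySem.Set.ofList xs).length := by
  constructor
  · intro h; rw [PySem.Set.ofList_eq_self_of_nodup xs h]
  · intro h
    obtain ⟨t, ht, hs⟩ := foldl_add_sublist xs ([] : List α)
    have hof : PySem.Set.ofList xs = t := by rw [PySem.Set.ofList_eq_foldl, ht]; simp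
    have : t = xs := hs.eq_of_length (by rw [← hof, ← h])
    have := PySem.Set.nodup_ofList (xs := xs)
    rwa [hof, ‹t = xs›] at this

-- ===== VERDICT (by name: the statement is the Claim_ definition above) =====
theorem check_distinct_spec : Claim_equal_check_distinct := by
  intro factors_list _ _
  unfold Spec_check_distinct check_distinct check_distinct_alt
  have h := checkChain factors_list (PySem.List.pyRange 0 4 1) [] ([], true)
    ⟨List.nodup_nil, fun _ => ⟨rfl, List.nodup_nil⟩, fun hb => by simp at hb⟩
  simp only [List.nil_append] at h
  set L := (PySem.List.pyRange 0 4 1).flatMap (fun i =>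
    (pvDictAt factors_list i).keys.map (fun k => (k, (pvDictAt factors_list i).getD k 0))) with hL
  set r := (PySem.List.pyRange 0 4 1).foldl
    (fun st i => checkInner (pvDictAt factors_list i) (pvDictAt factors_list i).keys st)
    (([] : List (Int × Int)), true) with hr
  obtain ⟨h1, h2, h3⟩ := h
  cases hb : r.2 with
  | true =>
      have := (h2 hb).2
      simp [decide_eq_true ((nodup_iff_len_set L).mp this)]
  | false =>
      have hnd := h3 hb
      have : ¬ L.length = (PySem.Set.ofList L).length := fun hc => hnd ((nodup_iff_len_set L).mpr hc)
      simp [this]
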